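-- pv_equiv track=rewrite | github.com/rajeshwar-sopho/advent-of-code | 2023/day-2/solution.py | solution_part1
-- ===== SOURCE A (Python) =====
-- def solution_part1(games):
--     max_rgb = [12, 13, 14]
--     game_id_sum = 0
--     for game_id, results in games.items():
--         game_failed = False
--         for result in results:
--             for item, max_item in zip(result, max_rgb):
--                 if item > max_item:
--                     game_failed = True
--                     break
--             if game_failed:
--                 break
--
--         if not game_failed:
--             game_id_sum += game_id
--     return game_id_sum
-- ===== SOURCE B (Python) =====
-- def _upd(m, res, i):
--     return res[i] if i < len(res) and res[i] > m else m
--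
--
-- def solution_part1(games):
--     total = 0
--     for game_id, results in games.items():
--         r = g = b = 0
--         for res in results:
--             r = _upd(r, res, 0)
--             g = _upd(g, res, 1)
--             b = _upd(b, res, 2)
--         if r <= 12 and g <= 13 and b <= 14:
--             total += game_id
--     return total
-- ===== Notes on version B (the rewrite author's own statement) =====
-- stated objective: alternative
-- what changed: B replaces A's per-result short-circuit failure flag (break out of nested loops on the first over-limit draw) with an aggregate-then-compare pass: it folds each game's results into three running per-color maxima (defaulting to 0 for missing colors, ignoring extras) and adds the game id after a single comparison of the maxima against the limits.
import Mathlib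
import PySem

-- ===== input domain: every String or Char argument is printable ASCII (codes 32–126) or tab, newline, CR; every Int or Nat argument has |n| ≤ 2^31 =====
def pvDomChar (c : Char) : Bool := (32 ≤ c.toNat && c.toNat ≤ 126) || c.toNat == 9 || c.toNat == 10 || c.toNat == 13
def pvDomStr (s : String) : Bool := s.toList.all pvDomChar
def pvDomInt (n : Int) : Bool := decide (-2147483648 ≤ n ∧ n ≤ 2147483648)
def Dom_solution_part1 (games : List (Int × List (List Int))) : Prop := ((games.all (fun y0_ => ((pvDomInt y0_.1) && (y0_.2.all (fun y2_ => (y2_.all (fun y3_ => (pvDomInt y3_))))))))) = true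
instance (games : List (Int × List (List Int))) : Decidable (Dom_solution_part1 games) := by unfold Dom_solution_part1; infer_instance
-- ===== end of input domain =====

-- B replaces A's per-result short-circuit failure flag with an aggregate pass computing
-- three per-color running maxima, compared against the limits once per game (alternative decomposition).

-- ===== PORT A =====
-- literal transliteration of A: nested loops with a break flag, modelled by folds that
-- keep returning the flag once it is set (which is exactly what 'break' makes Python do).
def solution_part1 (games : List (Int × List (List Int))) : Int :=
  let max_rgb : List Int := [12, 13, 14]
  games.foldl (fun game_id_sum g =>
    let game_failed := g.2.foldl (fun failed result =>
      if failed then failed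
      else (result.zip max_rgb).foldl (fun f p =>
        if f then f else decide (p.1 > p.2)) false) false
    if !game_failed then game_id_sum + g.1 else game_id_sum) 0

-- ===== PORT B =====
-- helper _upd of Source B: res[i] if i < len(res) and res[i] > m else m
def bUpd (m : Int) (res : List Int) (i : Nat) : Int :=
  match res[i]? with
  | some x => if x > m then x else m
  | none => m

def solution_part1_alt (games : List (Int × List (List Int))) : Int :=
  games.foldl (fun total g =>
    let m := g.2.foldl (fun (m : Int × Int × Int) res =>
      (bUpd m.1 res 0, bUpd m.2.1 res 1, bUpd m.2.2 res 2)) (0, 0, 0)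
    if m.1 ≤ 12 ∧ m.2.1 ≤ 13 ∧ m.2.2 ≤ 14 then total + g.1 else total) 0

-- ===== PRECONDITION & SPEC =====
def Spec_solution_part1 (games : List (Int × List (List Int))) (out : Int) : Prop := out = solution_part1_alt games
instance (games : List (Int × List (List Int))) (out : Int) : Decidable (Spec_solution_part1 games out) := by unfold Spec_solution_part1; infer_instance

-- ===== CLAIM (what is proved, stated in full; the proofs are below) =====
def Claim_equal_solution_part1 : Prop := ∀ (games : List (Int × List (List Int))), Dom_solution_part1 games → Spec_solution_part1 games (solution_part1 games)

-- ===== LEMMAS AND PROOFS =====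

-- a fold that threads a sticky flag computes 'initial flag or any'
theorem pvFoldFlag {α : Type} (g : α → Bool) :
    ∀ (l : List α) (f : Bool),
      l.foldl (fun f p => if f then f else g p) f = (f || l.any g) := by
  intro l
  induction l with
  | nil => intro f; simp
  | cons a t ih =>
      intro f
      cases f <;> simp [List.foldl, ih, Bool.or_assoc]

-- shorthand: does one draw exceed some limit (A's inner zip test)
def pvBad (res : List Int) : Bool :=
  (res.zip [(12 : Int), 13, 14]).any (fun p => decide (p.1 > p.2))

-- does a maxima triple lie within the limits
def pvPass (m : Int × Int × Int) : Bool :=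
  decide (m.1 ≤ 12) && decide (m.2.1 ≤ 13) && decide (m.2.2 ≤ 14)

-- one maxima-update step preserves 'pass' exactly when the draw is not bad
theorem pvPass_step (m : Int × Int × Int) (res : List Int) :
    pvPass (bUpd m.1 res 0, bUpd m.2.1 res 1, bUpd m.2.2 res 2)
      = (pvPass m && !pvBad res) := by
  rcases res with _ | ⟨a, _ | ⟨b, _ | ⟨c, t⟩⟩⟩ <;>
    simp only [pvPass, pvBad, bUpd, List.zip, List.zipWith, List.any,
      List.getElem?_nil, List.getElem?_cons_zero, List.getElem?_cons_succ] <;>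
    (try split_ifs) <;>
    (rw [Bool.eq_iff_iff]
     simp only [Bool.and_eq_true, Bool.or_eq_true, Bool.not_eq_true',
       Bool.or_eq_false_iff, Bool.and_eq_false_iff, decide_eq_true_eq,
       decide_eq_false_iff_not, or_false, and_true, true_and]
     try omega)

theorem pvPass_fold (l : List (List Int)) :
    ∀ (m : Int × Int × Int),
      pvPass (l.foldl (fun (m : Int × Int × Int) res =>
        (bUpd m.1 res 0, bUpd m.2.1 res 1, bUpd m.2.2 res 2)) m)
      = (pvPass m && !l.any pvBad) := by
  induction l with
  | nil => intro m; simp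
  | cons res t ih =>
      intro m
      simp only [List.foldl, List.any, ih, pvPass_step, Bool.not_or]
      ac_rfl

-- ===== VERDICT (by name: the statement is the Claim_ definition above) =====
theorem solution_part1_spec : Claim_equal_solution_part1 := by
  intro games _
  show solution_part1 games = solution_part1_alt games
  unfold solution_part1 solution_part1_alt
  apply PySem.List.foldl_congr_mem
  intro acc g _
  dsimp only
  have hA : g.2.foldl (fun failed result =>
      if failed then failed
      else (result.zip [(12 : Int), 13, 14]).foldl (fun f p =>
        if f then f else decide (p.1 > p.2)) false) false = g.2.any pvBad := by
    have hinner : ∀ result : List Int,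
        (result.zip [(12 : Int), 13, 14]).foldl (fun f p =>
          if f then f else decide (p.1 > p.2)) false = pvBad result := by
      intro result
      simpa using pvFoldFlag (fun p : Int × Int => decide (p.1 > p.2)) (result.zip [(12 : Int), 13, 14]) false
    calc g.2.foldl (fun failed result =>
            if failed then failed
            else (result.zip [(12 : Int), 13, 14]).foldl (fun f p =>
              if f then f else decide (p.1 > p.2)) false) false
        = g.2.foldl (fun failed result => if failed then failed else pvBad result) false := by
          congr 1; funext failed result; rw [hinner]
      _ = g.2.any pvBad := by simpa using pvFoldFlag pvBad g.2 false
  have hB := pvPass_fold g.2 (0, 0, 0)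
  simp only [hA]
  have hpass0 : pvPass (0, 0, 0) = true := by decide
  rw [hpass0, Bool.true_and] at hB
  by_cases h : g.2.any pvBad = true
  · rw [h] at hB ⊢
    simp only [Bool.not_true, Bool.false_eq_true] at hB ⊢
    have : ¬ ((g.2.foldl (fun (m : Int × Int × Int) res =>
        (bUpd m.1 res 0, bUpd m.2.1 res 1, bUpd m.2.2 res 2)) (0,0,0)).1 ≤ 12
        ∧ (g.2.foldl (fun (m : Int × Int × Int) res =>
        (bUpd m.1 res 0, bUpd m.2.1 res 1, bUpd m.2.2 res 2)) (0,0,0)).2.1 ≤ 13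
        ∧ (g.2.foldl (fun (m : Int × Int × Int) res =>
        (bUpd m.1 res 0, bUpd m.2.1 res 1, bUpd m.2.2 res 2)) (0,0,0)).2.2 ≤ 14) := by
      intro hc
      have : pvPass (g.2.foldl (fun (m : Int × Int × Int) res =>
        (bUpd m.1 res 0, bUpd m.2.1 res 1, bUpd m.2.2 res 2)) (0,0,0)) = true := by
        simp [pvPass, hc.1, hc.2.1, hc.2.2]
      rw [hB] at this; exact Bool.false_ne_true this
    simp [this]
  · rw [Bool.not_eq_true] at h
    rw [h] at hB ⊢
    simp only [Bool.not_false] at hB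
    have : ((g.2.foldl (fun (m : Int × Int × Int) res =>
        (bUpd m.1 res 0, bUpd m.2.1 res 1, bUpd m.2.2 res 2)) (0,0,0)).1 ≤ 12
        ∧ (g.2.foldl (fun (m : Int × Int × Int) res =>
        (bUpd m.1 res 0, bUpd m.2.1 res 1, bUpd m.2.2 res 2)) (0,0,0)).2.1 ≤ 13
        ∧ (g.2.foldl (fun (m : Int × Int × Int) res =>
        (bUpd m.1 res 0, bUpd m.2.1 res 1, bUpd m.2.2 res 2)) (0,0,0)).2.2 ≤ 14) := by
      have hp := hB
      simp only [pvPass, Bool.and_eq_true, decide_eq_true_eq] at hp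
      exact ⟨hp.1.1, hp.1.2, hp.2⟩
    simp [this]
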